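-- pv_equiv track=rewrite | github.com/PROGRAMMINinGPYTHON/minilogia | logia/neony_liniowo.py | neon
-- ===== SOURCE A (Python) =====
-- def neon(lista):
--     naj = 0
--     pom = lista[0]
--     for x in lista[1:]:
--         pom = pom+2
--         naj = max(naj,pom +x)
--         pom = max(pom,x)
--     return naj
-- ===== SOURCE B (Python) =====
-- def neon(lista):
--     n = len(lista)
--     # pass 1: prefix maxima of the shifted values lista[i] - 2*i
--     pref = [lista[0]]
--     for i in range(1, n):
--         pref.append(max(pref[i - 1], lista[i] - 2 * i))
--     # pass 2: combine each j with the best earlier i via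
--     # lista[i] + lista[j] + 2*(j-i) = (lista[i] - 2*i) + (lista[j] + 2*j)
--     naj = 0
--     for j in range(1, n):
--         naj = max(naj, pref[j - 1] + lista[j] + 2 * j)
--     return naj
-- ===== Notes on version B (the rewrite author's own statement) =====
-- stated objective: alternative
-- what changed: Replaces A's single fused pass (accumulator shifted by +2 each step) with a staged two-pass algorithm: pass 1 materialises the prefix-maximum array of lista[i]-2*i, pass 2 scans j once combining pref[j-1] with lista[j]+2*j, using the split a[i]+a[j]+2*(j-i) = (a[i]-2*i) + (a[j]+2*j).
import Mathlib
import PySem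

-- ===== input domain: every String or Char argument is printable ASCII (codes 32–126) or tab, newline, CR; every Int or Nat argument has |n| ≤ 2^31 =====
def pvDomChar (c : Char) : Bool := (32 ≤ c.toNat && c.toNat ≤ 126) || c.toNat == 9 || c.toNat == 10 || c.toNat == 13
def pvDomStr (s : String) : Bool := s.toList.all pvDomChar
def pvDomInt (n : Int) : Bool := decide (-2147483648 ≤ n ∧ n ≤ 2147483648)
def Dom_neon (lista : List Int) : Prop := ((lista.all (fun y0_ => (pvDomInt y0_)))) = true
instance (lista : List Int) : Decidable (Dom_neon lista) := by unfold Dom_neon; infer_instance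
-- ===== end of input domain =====

-- B replaces A's fused single pass by a staged two-pass algorithm: pass 1 materialises the
-- prefix-maximum array of lista[i]-2*i, pass 2 scans j combining pref[j-1] with lista[j]+2*j.

-- ===== PORT A =====
def neon (lista : List Int) : Int :=
  ((PySem.List.slice lista (some 1) none).foldl
    (fun (s : Int × Int) x =>
      let pom := s.2 + 2
      let naj := max s.1 (pom + x)
      (naj, max pom x))
    (0, (PySem.List.pyGet? lista 0).getD 0)).1

-- ===== PORT B =====
def neon_alt (lista : List Int) : Int :=
  let n : Int := lista.length
  let pref :=
    (PySem.List.pyRange 1 n 1).foldl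
      (fun (pref : List Int) i =>
        pref ++ [max (PySem.List.pyGetD pref (i - 1) 0)
                     (PySem.List.pyGetD lista i 0 - 2 * i)])
      [(PySem.List.pyGet? lista 0).getD 0]
  (PySem.List.pyRange 1 n 1).foldl
    (fun (naj : Int) j =>
      max naj (PySem.List.pyGetD pref (j - 1) 0 + PySem.List.pyGetD lista j 0 + 2 * j))
    0

-- ===== PRECONDITION & SPEC =====
-- Pre_ excludes the empty list, on which Python A raises IndexError (lista[0]); B raises there too.
def Pre_neon (lista : List Int) : Prop := lista ≠ []
instance (lista : List Int) : Decidable (Pre_neon lista) := by unfold Pre_neon; infer_instance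
def pvWitness_neon : List Int := [3, -1, 4]

def Spec_neon (lista : List Int) (out : Int) : Prop := out = neon_alt lista
instance (lista : List Int) (out : Int) : Decidable (Spec_neon lista out) := by unfold Spec_neon; infer_instance

-- ===== CLAIM (what is proved, stated in full; the proofs are below) =====
def Claim_equal_neon : Prop := ∀ (lista : List Int), Dom_neon lista → Pre_neon lista → Spec_neon lista (neon lista)

-- ===== LEMMAS AND PROOFS =====

-- Structural description of B's first pass over the tail: running maxima of x - 2*j.
def buildPref (t : List Int) (j b : Int) : List Int :=
  match t with
  | [] => []
  | x :: t => max b (x - 2 * j) :: buildPref t (j + 1) (max b (x - 2 * j))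

theorem pv_getD_len_append (front : List Int) (x : Int) (t : List Int) :
    (front ++ x :: t).getD front.length 0 = x := by
  induction front with
  | nil => rfl
  | cons a f ih => simp

theorem pv_getD_last (L : List Int) (y : Int) :
    (L ++ [y]).getD ((L ++ [y]).length - 1) 0 = y := by
  induction L with
  | nil => rfl
  | cons a l ih => simp

theorem pv_getD_append_of_lt (L rest : List Int) (n : Nat) (h : n < L.length) :
    (L ++ rest).getD n 0 = L.getD n 0 := by
  induction L generalizing n with
  | nil => exact absurd h (Nat.not_lt_zero n)
  | cons a l ih =>
    cases n with
    | zero => rfl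
    | succ n => simpa using ih n (by simpa using h)

-- B's first loop builds exactly L ++ buildPref t |L| b when the last entry of L is b.
theorem pref_loop (t : List Int) : ∀ (front L : List Int) (b : Int),
    front.length = L.length → 0 < L.length → L.getD (L.length - 1) 0 = b →
    (PySem.List.pyRange (L.length : Int) ((L.length : Int) + (t.length : Int)) 1).foldl
      (fun pref i => pref ++ [max (PySem.List.pyGetD pref (i - 1) 0)
                                  (PySem.List.pyGetD (front ++ t) i 0 - 2 * i)]) L
      = L ++ buildPref t (L.length : Int) b := by
  induction t with
  | nil =>
    intro front L b _ _ _
    simp [buildPref, PySem.List.pyRange_one_eq_nil]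
  | cons x t ih =>
    intro front L b hfl hL hb
    have hlt : (L.length : Int) < (L.length : Int) + ((x :: t).length : Int) := by
      push_cast [List.length_cons]; omega
    rw [PySem.List.pyRange_one_cons hlt, List.foldl_cons]
    have h1 : ((L.length : Int) - 1) = ((L.length - 1 : Nat) : Int) := by omega
    have h2 : PySem.List.pyGetD L ((L.length : Int) - 1) 0 = b := by
      rw [h1, PySem.List.pyGetD_natCast]; exact hb
    have h3 : PySem.List.pyGetD (front ++ x :: t) (L.length : Int) 0 = x := by
      rw [← hfl, PySem.List.pyGetD_natCast, pv_getD_len_append]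
    rw [h2, h3]
    have key := ih (front ++ [x]) (L ++ [max b (x - 2 * (L.length : Int))])
      (max b (x - 2 * (L.length : Int))) (by simp [hfl]) (by simp) (pv_getD_last _ _)
    simp only [List.append_assoc, List.singleton_append] at key
    rw [show (((L ++ [max b (x - 2 * (L.length : Int))]).length : Int)) = (L.length : Int) + 1
        from by push_cast [List.length_append, List.length_cons, List.length_nil]; ring] at key
    rw [show ((L.length : Int) + ((x :: t).length : Int)) = ((L.length : Int) + 1) + (t.length : Int)
        from by push_cast [List.length_cons]; ring]
    rw [show buildPref (x :: t) (L.length : Int) b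
        = max b (x - 2 * (L.length : Int)) :: buildPref t ((L.length : Int) + 1)
            (max b (x - 2 * (L.length : Int))) from rfl]
    exact key

-- B's second loop computes the first component of A's fold over the tail.
theorem main_loop (t : List Int) : ∀ (front PF : List Int) (b naj : Int),
    front.length = PF.length → 0 < PF.length → PF.getD (PF.length - 1) 0 = b →
    (PySem.List.pyRange (PF.length : Int) ((PF.length : Int) + (t.length : Int)) 1).foldl
      (fun naj j => max naj (PySem.List.pyGetD (PF ++ buildPref t (PF.length : Int) b) (j - 1) 0
                              + PySem.List.pyGetD (front ++ t) j 0 + 2 * j)) naj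
    = (t.foldl (fun (s : Int × Int) x => (max s.1 (s.2 + 2 + x), max (s.2 + 2) x))
        (naj, b + 2 * ((PF.length : Int) - 1))).1 := by
  induction t with
  | nil =>
    intro front PF b naj _ _ _
    simp [PySem.List.pyRange_one_eq_nil]
  | cons x t ih =>
    intro front PF b naj hfl hPF hb
    have hlt : (PF.length : Int) < (PF.length : Int) + ((x :: t).length : Int) := by
      push_cast [List.length_cons]; omega
    rw [PySem.List.pyRange_one_cons hlt, List.foldl_cons, List.foldl_cons]
    dsimp only
    have h1 : ((PF.length : Int) - 1) = ((PF.length - 1 : Nat) : Int) := by omega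
    have h2 : PySem.List.pyGetD (PF ++ buildPref (x :: t) (PF.length : Int) b)
        ((PF.length : Int) - 1) 0 = b := by
      rw [h1, PySem.List.pyGetD_natCast, pv_getD_append_of_lt _ _ _ (by omega)]
      exact hb
    have h3 : PySem.List.pyGetD (front ++ x :: t) (PF.length : Int) 0 = x := by
      rw [← hfl, PySem.List.pyGetD_natCast, pv_getD_len_append]
    rw [h2, h3]
    have hnaj : max naj (b + 2 * ((PF.length : Int) - 1) + 2 + x)
        = max naj (b + x + 2 * (PF.length : Int)) := by
      rw [show b + 2 * ((PF.length : Int) - 1) + 2 + x = b + x + 2 * (PF.length : Int)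
          from by ring]
    have hpom : max (b + 2 * ((PF.length : Int) - 1) + 2) x
        = max b (x - 2 * (PF.length : Int)) + 2 * (PF.length : Int) := by
      rw [max_def, max_def]; split_ifs <;> omega
    rw [hnaj, hpom]
    have key := ih (front ++ [x]) (PF ++ [max b (x - 2 * (PF.length : Int))])
      (max b (x - 2 * (PF.length : Int))) (max naj (b + x + 2 * (PF.length : Int)))
      (by simp [hfl]) (by simp) (pv_getD_last _ _)
    simp only [List.append_assoc, List.singleton_append] at key
    rw [show (((PF ++ [max b (x - 2 * (PF.length : Int))]).length : Int)) = (PF.length : Int) + 1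
        from by push_cast [List.length_append, List.length_cons, List.length_nil]; ring] at key
    rw [show ((PF.length : Int) + 1 - 1) = (PF.length : Int) from by ring] at key
    rw [show ((PF.length : Int) + ((x :: t).length : Int)) = ((PF.length : Int) + 1) + (t.length : Int)
        from by push_cast [List.length_cons]; ring]
    rw [show buildPref (x :: t) (PF.length : Int) b
        = max b (x - 2 * (PF.length : Int)) :: buildPref t ((PF.length : Int) + 1)
            (max b (x - 2 * (PF.length : Int))) from rfl]
    exact key

-- ===== VERDICT (by name: the statement is the Claim_ definition above) =====
theorem neon_spec : Claim_equal_neon := by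
  intro lista _ hpre
  unfold Spec_neon neon neon_alt
  obtain ⟨a0, t, rfl⟩ : ∃ a0 t, lista = a0 :: t := by
    cases lista with
    | nil => exact absurd rfl hpre
    | cons a t => exact ⟨a, t, rfl⟩
  simp only [PySem.List.slice_from_one, List.tail_cons, PySem.List.pyGet?_zero_cons,
    Option.getD_some]
  rw [show (((a0 :: t).length : Int)) = 1 + (t.length : Int)
      from by push_cast [List.length_cons]; ring]
  have hpref := pref_loop t [a0] [a0] a0 rfl (by simp) (by simp)
  norm_num at hpref
  rw [hpref]
  have hmain := main_loop t [a0] [a0] a0 0 rfl (by simp) (by simp)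
  norm_num at hmain
  rw [hmain]
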